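-- pv_equiv track=rewrite | github.com/VoltCyclone/RaspberryKMBox | tools/generate_lut.py | format_array
-- ===== SOURCE A (Python) =====
-- def format_array(values, per_line=8, indent="    "):
--     """Format array values for C code."""
--     lines = []
--     for i in range(0, len(values), per_line):
--         chunk = values[i:i+per_line]
--         line = indent + ", ".join(f"{v}" for v in chunk)
--         if i + per_line < len(values):
--             line += ","
--         lines.append(line)
--     return "\n".join(lines)
-- ===== SOURCE B (Python) =====
-- def format_array(values, per_line=8, indent="    "):
--     """Format array values for C code."""
--     if not values:
--         return ""
--     pieces = [indent, str(values[0])]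
--     for i, v in enumerate(values[1:], 1):
--         pieces.append(",\n" + indent if i % per_line == 0 else ", ")
--         pieces.append(str(v))
--     return "".join(pieces)
-- ===== Notes on version B (the rewrite author's own statement) =====
-- stated objective: simpler
-- what changed: A slices the list into per_line chunks with look-ahead boundary checks and joins twice; B makes one enumerate pass over the values, emitting before each value after the first either ', ' or ',\n'+indent when the index is a multiple of per_line.
-- intended difference: On per_line < 0 with nonempty values A returns '' (range(0, n, negative) is empty, silently dropping every value); B formats them |per_line| per line, the intended behaviour since a formatter that silently drops its data is never wanted. — e.g. on format_array([1, 2], -1, " "): A returns "", B returns " 1,\n 2"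
import Mathlib
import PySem

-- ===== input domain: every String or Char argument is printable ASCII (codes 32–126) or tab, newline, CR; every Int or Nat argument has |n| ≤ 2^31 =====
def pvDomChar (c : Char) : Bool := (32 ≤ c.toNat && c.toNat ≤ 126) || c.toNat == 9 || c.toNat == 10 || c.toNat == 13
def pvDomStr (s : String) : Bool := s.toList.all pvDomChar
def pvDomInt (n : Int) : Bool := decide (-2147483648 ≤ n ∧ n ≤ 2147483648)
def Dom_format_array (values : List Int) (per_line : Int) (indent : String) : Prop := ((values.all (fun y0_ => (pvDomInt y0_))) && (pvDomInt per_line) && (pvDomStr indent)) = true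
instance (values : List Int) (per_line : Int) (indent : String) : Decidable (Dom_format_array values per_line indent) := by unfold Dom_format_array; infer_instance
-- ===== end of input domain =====

-- B replaces A's chunk slicing/look-ahead with one enumerate pass appending a separator
-- (",\n"+indent at each line start, ", " otherwise) before every value after the first (objective: simpler).

-- ===== PORT A =====
def format_array (values : List Int) (per_line : Int) (indent : String) : String :=
  let lines : List String :=
    (PySem.List.pyRange 0 (values.length : Int) per_line).foldl
      (fun lines i =>
        let chunk := PySem.List.slice values (some i) (some (i + per_line))
        let line := indent ++ PySem.Str.join ", " (chunk.map PySem.Int.toStr)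
        let line := if i + per_line < (values.length : Int) then line ++ "," else line
        lines ++ [line])
      []
  PySem.Str.join "\n" lines

-- ===== PORT B =====
def format_array_alt (values : List Int) (per_line : Int) (indent : String) : String :=
  match values with
  | [] => ""
  | v0 :: rest =>
    let st := rest.foldl
      (fun (st : Int × List String) v =>
        (st.1 + 1,
         st.2 ++ [if PySem.Int.mod st.1 per_line = 0 then ",\n" ++ indent else ", ",
                  PySem.Int.toStr v]))
      (1, [indent, PySem.Int.toStr v0])
    PySem.Str.join "" st.2

-- ===== PRECONDITION & SPEC =====
-- Pre_ excludes per_line = 0, on which Python A raises ValueError (range() with step 0).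
def Pre_format_array (values : List Int) (per_line : Int) (indent : String) : Prop :=
  per_line ≠ 0
instance (values : List Int) (per_line : Int) (indent : String) : Decidable (Pre_format_array values per_line indent) := by unfold Pre_format_array; infer_instance

def pvWitness_format_array : List Int × Int × String := ([1, 2, 3], 2, "  ")

-- On negative per_line with nonempty values A returns "" (range(0, n, negative) is empty, silently
-- dropping every value); B formats the values |per_line| per line, the intended behaviour since a
-- formatter that silently drops its data is never what the caller wants.
def D_format_array (values : List Int) (per_line : Int) (indent : String) : Prop :=
  per_line < 0 ∧ values ≠ []
instance (values : List Int) (per_line : Int) (indent : String) : Decidable (D_format_array values per_line indent) := by unfold D_format_array; infer_instance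

def Spec_format_array (values : List Int) (per_line : Int) (indent : String) (out : String) : Prop :=
  ¬ D_format_array values per_line indent → out = format_array_alt values per_line indent
instance (values : List Int) (per_line : Int) (indent : String) (out : String) : Decidable (Spec_format_array values per_line indent out) := by unfold Spec_format_array; infer_instance

def pvDiffWitness_format_array : List Int × Int × String := ([1, 2], -1, " ")
def pvDiffWitnessOut_format_array : String × String := ("", " 1,\n 2")

-- ===== CLAIM (what is proved, stated in full; the proofs are below) =====
def Claim_unchanged_format_array : Prop := ∀ (values : List Int) (per_line : Int) (indent : String), Dom_format_array values per_line indent → Pre_format_array values per_line indent → Spec_format_array values per_line indent (format_array values per_line indent)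
def Claim_changed_format_array : Prop := Dom_format_array (pvDiffWitness_format_array.1) (pvDiffWitness_format_array.2.1) (pvDiffWitness_format_array.2.2) ∧ Pre_format_array (pvDiffWitness_format_array.1) (pvDiffWitness_format_array.2.1) (pvDiffWitness_format_array.2.2) ∧ D_format_array (pvDiffWitness_format_array.1) (pvDiffWitness_format_array.2.1) (pvDiffWitness_format_array.2.2) ∧ format_array (pvDiffWitness_format_array.1) (pvDiffWitness_format_array.2.1) (pvDiffWitness_format_array.2.2) = pvDiffWitnessOut_format_array.1 ∧ format_array_alt (pvDiffWitness_format_array.1) (pvDiffWitness_format_array.2.1) (pvDiffWitness_format_array.2.2) = pvDiffWitnessOut_format_array.2 ∧ pvDiffWitnessOut_format_array.1 ≠ pvDiffWitnessOut_format_array.2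
def Claim_exact_format_array : Prop := ∀ (values : List Int) (per_line : Int) (indent : String), Dom_format_array values per_line indent → Pre_format_array values per_line indent → D_format_array values per_line indent → format_array values per_line indent ≠ format_array_alt values per_line indent

-- ===== LEMMAS AND PROOFS =====

-- proof-side helpers: the separator B emits before element number s, and the string B's loop builds
def sepAt (p : Int) (ind : String) (s : Int) : String :=
  if PySem.Int.mod s p = 0 then ",\n" ++ ind else ", "

def refFmt (p : Int) (ind : String) : Int → List Int → String
  | _, [] => ""
  | s, v :: vs => sepAt p ind s ++ (PySem.Int.toStr v ++ refFmt p ind (s + 1) vs)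

def bodyFmt (p : Int) (ind : String) : List Int → String
  | [] => ""
  | v :: vs => ind ++ (PySem.Int.toStr v ++ refFmt p ind 1 vs)

def commaRun : List Int → String
  | [] => ""
  | v :: vs => ", " ++ (PySem.Int.toStr v ++ commaRun vs)

def lineTail (p : Int) (ind : String) : List Int → String
  | [] => ""
  | w :: ws => ",\n" ++ bodyFmt p ind (w :: ws)

def lineFn (l : List Int) (p : Int) (ind : String) (i : Int) : String :=
  let line := ind ++ PySem.Str.join ", " ((PySem.List.slice l (some i) (some (i + p))).map PySem.Int.toStr)
  if i + p < (l.length : Int) then line ++ "," else line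

-- basic string-join facts (proved on the List Char side)
lemma join_nil_str (sep : String) : PySem.Str.join sep [] = "" := by
  apply String.toList_inj.mp
  simp [PySem.Str.toList_join, PySem.Chars.join_nil]

lemma join_singleton_str (sep x : String) : PySem.Str.join sep [x] = x := by
  apply String.toList_inj.mp
  simp [PySem.Str.toList_join, PySem.Chars.join_singleton]

lemma join_cons_cons_str (sep x y : String) (r : List String) :
    PySem.Str.join sep (x :: y :: r) = x ++ sep ++ PySem.Str.join sep (y :: r) := by
  apply String.toList_inj.mp
  simp [PySem.Str.toList_join, PySem.Chars.join_cons_cons]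

lemma join_empty_cons (x : String) (xs : List String) :
    PySem.Str.join "" (x :: xs) = x ++ PySem.Str.join "" xs := by
  cases xs with
  | nil => simp [join_singleton_str, join_nil_str, String.append_empty]
  | cons y r =>
    rw [join_cons_cons_str, String.append_empty]

lemma join_empty_append_pair (acc : List String) (a b : String) :
    PySem.Str.join "" (acc ++ [a, b]) = PySem.Str.join "" acc ++ (a ++ b) := by
  induction acc with
  | nil =>
    simp [join_empty_cons, join_nil_str, String.empty_append, String.append_empty]
  | cons c cs ih =>
    rw [List.cons_append, join_empty_cons, ih, join_empty_cons, String.append_assoc]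

-- B's loop builds exactly refFmt
lemma alt_fold (p : Int) (ind : String) (l : List Int) : ∀ (s : Int) (acc : List String),
    PySem.Str.join "" ((l.foldl
      (fun (st : Int × List String) v =>
        (st.1 + 1,
         st.2 ++ [if PySem.Int.mod st.1 p = 0 then ",\n" ++ ind else ", ", PySem.Int.toStr v]))
      (s, acc)).2)
    = PySem.Str.join "" acc ++ refFmt p ind s l := by
  induction l with
  | nil => intro s acc; simp [refFmt, String.append_empty]
  | cons v vs ih =>
    intro s acc
    rw [List.foldl_cons]
    rw [ih (s + 1) (acc ++ [if PySem.Int.mod s p = 0 then ",\n" ++ ind else ", ", PySem.Int.toStr v])]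
    rw [join_empty_append_pair, refFmt, sepAt, String.append_assoc, String.append_assoc]

lemma alt_eq_body (l : List Int) (p : Int) (ind : String) :
    format_array_alt l p ind = bodyFmt p ind l := by
  cases l with
  | nil => rfl
  | cons v0 rest =>
    show PySem.Str.join "" ((rest.foldl _ (1, [ind, PySem.Int.toStr v0])).2) = _
    rw [alt_fold, bodyFmt]
    rw [join_empty_cons, join_empty_cons, join_nil_str, String.append_empty, String.append_assoc]

-- separator only depends on the index modulo per_line
lemma sep_period (p : Int) (ind : String) (s : Int) : sepAt p ind (s + p) = sepAt p ind s := by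
  unfold sepAt
  simp [PySem.Int.mod_eq_zero_iff_dvd, dvd_add_self_right]

lemma ref_period (p : Int) (ind : String) (l : List Int) : ∀ s,
    refFmt p ind (s + p) l = refFmt p ind s l := by
  induction l with
  | nil => intro s; rfl
  | cons v vs ih =>
    intro s
    rw [refFmt, refFmt, sep_period]
    have : s + p + 1 = (s + 1) + p := by ring
    rw [this, ih]

-- unrolling B's loop across one line: r more elements fit on the current line
lemma ref_run (p : Int) (ind : String) (hp : 0 < p) (l : List Int) : ∀ (r : Nat), (r : Int) < p →
    refFmt p ind (p - r) l = commaRun (l.take r) ++ lineTail p ind (l.drop r) := by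
  induction l with
  | nil =>
    intro r _
    simp [refFmt, commaRun, lineTail]
  | cons v vs ih =>
    intro r hr
    cases r with
    | zero =>
      have hmod : PySem.Int.mod p p = 0 := (PySem.Int.mod_eq_zero_iff_dvd p p).mpr dvd_rfl
      have h1 : (1 : Int) + p = 1 + p := rfl
      simp only [Nat.cast_zero, sub_zero, List.take_zero, List.drop_zero]
      rw [refFmt, sepAt, if_pos hmod]
      have : p + 1 = 1 + p := by ring
      rw [this, ref_period]
      rw [commaRun, lineTail, bodyFmt, String.empty_append, String.append_assoc]
    | succ r' =>
      have hr' : (r' : Int) < p := by push_cast at hr ⊢; omega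
      have hpos : 0 < p - ((r' : Int) + 1) := by push_cast at hr; omega
      have hlt : p - ((r' : Int) + 1) < p := by omega
      have hmod : ¬ PySem.Int.mod (p - ((r' : Nat) + 1 : Nat)) p = 0 := by
        rw [PySem.Int.mod_eq_zero_iff_dvd]
        intro hdvd
        have := Int.le_of_dvd (by push_cast; omega) hdvd
        push_cast at this
        omega
      rw [refFmt, sepAt, if_neg hmod]
      have hshift : (p - ((r' : Nat) + 1 : Nat)) + 1 = p - (r' : Int) := by push_cast; ring
      rw [hshift, ih r' hr']
      rw [List.take_succ_cons, List.drop_succ_cons, commaRun, String.append_assoc, String.append_assoc]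

-- a run of p-1 further values joined by ", " equals Python's ", ".join over the chunk
lemma join_comma (v : Int) (l : List Int) :
    PySem.Str.join ", " ((v :: l).map PySem.Int.toStr) = PySem.Int.toStr v ++ commaRun l := by
  induction l generalizing v with
  | nil => simp [join_singleton_str, commaRun, String.append_empty]
  | cons w ws ih =>
    rw [List.map_cons, List.map_cons, join_cons_cons_str, ← List.map_cons, ih w, commaRun,
      String.append_assoc]

-- B one chunk at a time
lemma lineFn_zero (l : List Int) (p : Int) (ind : String) (hp : 0 < p) :
    lineFn l p ind 0 =
      (ind ++ PySem.Str.join ", " ((l.take p.toNat).map PySem.Int.toStr)) ++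
        (if p < (l.length : Int) then "," else "") := by
  simp only [lineFn, zero_add]
  rw [PySem.List.slice_zero_start, PySem.List.slice_to _ (le_of_lt hp)]
  split_ifs
  · rfl
  · rw [String.append_empty]

lemma lineFn_shift (l : List Int) (p : Int) (ind : String) (hp : 0 < p) (k : Nat) :
    lineFn l p ind (p * ((k : Int) + 1)) = lineFn (l.drop p.toNat) p ind (p * (k : Int)) := by
  obtain ⟨P, rfl⟩ : ∃ P : Nat, p = (P : Int) := ⟨p.toNat, (Int.toNat_of_nonneg (le_of_lt hp)).symm⟩
  simp only [lineFn, Int.toNat_natCast]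
  have e1 : (P : Int) * ((k : Int) + 1) = ((P * k + P : Nat) : Int) := by push_cast; ring
  have e2 : (P : Int) * (k : Int) = ((P * k : Nat) : Int) := by push_cast; ring
  rw [e1, e2, PySem.List.slice_natCast_add, PySem.List.slice_natCast_add, List.drop_drop,
    Nat.add_comm P (P * k)]
  have hcond : (((P * k + P : Nat)) : Int) + (P : Int) < (l.length : Int) ↔
      ((P * k : Nat) : Int) + (P : Int) < ((l.drop P).length : Int) := by
    rw [List.length_drop]
    generalize P * k = m
    omega
  simp only [hcond]

lemma body_chunk (p : Int) (ind : String) (hp : 0 < p) (v : Int) (vs : List Int) :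
    bodyFmt p ind (v :: vs) =
      (ind ++ PySem.Str.join ", " (((v :: vs).take p.toNat).map PySem.Int.toStr)) ++
        lineTail p ind ((v :: vs).drop p.toNat) := by
  have hP : p.toNat = (p.toNat - 1) + 1 := by omega
  have hcast : (((p.toNat - 1 : Nat)) : Int) < p := by omega
  have h1 : (1 : Int) = p - ((p.toNat - 1 : Nat) : Int) := by omega
  rw [bodyFmt, h1, ref_run p ind hp vs (p.toNat - 1) hcast, hP,
    List.take_succ_cons, List.drop_succ_cons, join_comma]
  simp only [Nat.add_sub_cancel, String.append_assoc]

-- A unfolded to a map over the chunk starts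
lemma a_unfold (l : List Int) (p : Int) (ind : String) :
    format_array l p ind =
      PySem.Str.join "\n" ((PySem.List.pyRange 0 (l.length : Int) p).map (lineFn l p ind)) := by
  show PySem.Str.join "\n"
      ((PySem.List.pyRange 0 (l.length : Int) p).foldl (fun lines i => lines ++ [lineFn l p ind i]) []) = _
  rw [PySem.List.foldl_append_singleton_eq_map, List.nil_append]

-- A one chunk at a time
lemma lines_norm (g : Int → String) (p : Int) (M : Nat) :
    List.map g (List.map (fun k : Nat => 0 + p * (k : Int)) (List.range M)) =
      List.map (fun k : Nat => g (p * (k : Int))) (List.range M) := by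
  rw [List.map_map]
  apply List.map_congr_left
  intro k _
  simp

lemma map_range_succ_shift (f : Int → String) (M : Nat) (p : Int) :
    List.map (fun k : Nat => f (p * (k : Int))) (List.range (M + 1)) =
      f 0 :: List.map (fun k : Nat => f (p * ((k : Int) + 1))) (List.range M) := by
  rw [List.range_succ_eq_map, List.map_cons, List.map_map]
  simp [Function.comp_def]

lemma a_chunk (p : Int) (ind : String) (hp : 0 < p) (l : List Int) (hl : l ≠ []) :
    format_array l p ind =
      (ind ++ PySem.Str.join ", " ((l.take p.toNat).map PySem.Int.toStr)) ++
        (if p < (l.length : Int) then "," ++ ("\n" ++ format_array (l.drop p.toNat) p ind) else "") := by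
  have hn : 0 < (l.length : Int) := by
    have := List.length_pos_iff.mpr hl
    exact_mod_cast this
  rw [a_unfold, PySem.List.pyRange_of_pos 0 _ hp, if_pos hn]
  simp only [sub_zero]
  rw [lines_norm (lineFn l p ind) p]
  have hM1 : 1 ≤ ((l.length : Int) + p - 1) / p := (Int.le_ediv_iff_mul_le hp).mpr (by omega)
  obtain ⟨M', hM'⟩ : ∃ M', (((l.length : Int) + p - 1) / p).toNat = M' + 1 :=
    ⟨(((l.length : Int) + p - 1) / p).toNat - 1, by omega⟩
  rw [hM', map_range_succ_shift (lineFn l p ind) M' p]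
  by_cases hpn : p < (l.length : Int)
  · -- at least two chunks
    have hM2 : 2 ≤ ((l.length : Int) + p - 1) / p := (Int.le_ediv_iff_mul_le hp).mpr (by omega)
    obtain ⟨M'', hM''⟩ : ∃ M'', M' = M'' + 1 := ⟨M' - 1, by omega⟩
    have htail : List.map (fun k : Nat => lineFn l p ind (p * ((k : Int) + 1))) (List.range M') =
        List.map (fun k : Nat => lineFn (l.drop p.toNat) p ind (p * (k : Int))) (List.range M') := by
      apply List.map_congr_left
      intro k _
      exact lineFn_shift l p ind hp k
    have hdrop : format_array (l.drop p.toNat) p ind =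
        PySem.Str.join "\n"
          (List.map (fun k : Nat => lineFn (l.drop p.toNat) p ind (p * (k : Int))) (List.range M')) := by
      rw [a_unfold, PySem.List.pyRange_of_pos 0 _ hp]
      have hlen : ((l.drop p.toNat).length : Int) = (l.length : Int) - p := by
        rw [List.length_drop]
        omega
      rw [hlen, if_pos (by omega : (0 : Int) < (l.length : Int) - p)]
      simp only [sub_zero]
      rw [lines_norm (lineFn (l.drop p.toNat) p ind) p]
      have key : ((l.length : Int) - p + p - 1) / p = ((l.length : Int) + p - 1) / p - 1 := by
        have h2 : (l.length : Int) + p - 1 = ((l.length : Int) - 1) + 1 * p := by ring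
        have h3 : (l.length : Int) - p + p - 1 = (l.length : Int) - 1 := by ring
        rw [h2, h3, Int.add_mul_ediv_right _ _ (ne_of_gt hp)]
        omega
      have hcount : (((l.length : Int) - p + p - 1) / p).toNat = M' := by
        rw [key]; omega
      rw [hcount]
    obtain ⟨y, r, hyr⟩ : ∃ y r,
        List.map (fun k : Nat => lineFn l p ind (p * ((k : Int) + 1))) (List.range M') = y :: r := by
      rw [hM'', List.range_succ_eq_map, List.map_cons]
      exact ⟨_, _, rfl⟩
    rw [hyr, join_cons_cons_str, ← hyr, htail, ← hdrop, lineFn_zero l p ind hp, if_pos hpn, if_pos hpn]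
    simp only [String.append_assoc]
  · -- a single chunk
    have hM2 : ((l.length : Int) + p - 1) / p < 2 := (Int.ediv_lt_iff_lt_mul hp).mpr (by omega)
    have hM'0 : M' = 0 := by omega
    rw [hM'0]
    simp only [List.range_zero, List.map_nil]
    rw [join_singleton_str, lineFn_zero l p ind hp, if_neg hpn, if_neg hpn, String.append_empty]
lemma main_eq (p : Int) (ind : String) (hp : 0 < p) : ∀ (N : Nat) (l : List Int), l.length ≤ N → l ≠ [] →
    format_array l p ind = bodyFmt p ind l := by
  intro N
  induction N with
  | zero =>
    intro l hl hne
    exact absurd (List.eq_nil_of_length_eq_zero (by omega)) hne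
  | succ N ih =>
    intro l hl hne
    cases l with
    | nil => exact absurd rfl hne
    | cons v vs =>
      rw [a_chunk p ind hp _ hne, body_chunk p ind hp]
      congr 1
      cases hd : (v :: vs).drop p.toNat with
      | nil =>
        rw [lineTail]
        have hle : (v :: vs).length ≤ p.toNat := List.drop_eq_nil_iff.mp hd
        rw [if_neg (by omega : ¬ p < ((v :: vs).length : Int))]
      | cons w ws =>
        have hgt : p.toNat < (v :: vs).length := by
          by_contra hle
          rw [List.drop_eq_nil_iff.mpr (by omega)] at hd
          cases hd
        rw [if_pos (by omega : p < ((v :: vs).length : Int)), lineTail]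
        have hlen : (w :: ws).length ≤ N := by
          have hld := List.length_drop (i := p.toNat) (l := v :: vs)
          rw [hd] at hld
          simp only [List.length_cons] at *
          omega
        rw [ih (w :: ws) hlen (by simp), ← String.append_assoc,
          show ("," : String) ++ "\n" = ",\n" from by decide]

lemma a_empty_range (values : List Int) (p : Int) (ind : String) (hp : ¬ 0 < p) :
    format_array values p ind = "" := by
  have hr : PySem.List.pyRange 0 (values.length : Int) p = [] := by
    unfold PySem.List.pyRange
    by_cases h0 : p = 0
    · simp [h0]
    · have hlen : ¬ ((values.length : Int) < 0) := by omega
      simp [h0, hp, hlen]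
  rw [a_unfold, hr]
  exact join_nil_str _

lemma toChars_ne_nil (n : Int) : PySem.Int.toChars n ≠ [] := by
  unfold PySem.Int.toChars
  split
  · simp
  · have := @Nat.length_toDigits_pos 10 n.toNat
    intro h
    rw [h] at this
    simp at this

-- ===== VERDICT (by name: the statements are the Claim_ definitions above) =====
theorem format_array_spec : Claim_unchanged_format_array := by
  intro values p ind _ hpre hnd
  by_cases hv : values = []
  · subst hv
    have h0 : format_array [] p ind = "" := by
      rw [a_unfold]
      have hr : PySem.List.pyRange 0 ((List.length ([] : List Int)) : Int) p = [] := by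
        unfold PySem.List.pyRange
        simp
      rw [hr]
      exact join_nil_str _
    rw [h0]
    rfl
  · have hp : 0 < p := by
      have hnn : ¬ p < 0 := fun h => hnd ⟨h, hv⟩
      have hne0 : p ≠ 0 := hpre
      omega
    rw [main_eq p ind hp values.length values le_rfl hv, alt_eq_body]

theorem format_array_changed : Claim_changed_format_array := by
  unfold Claim_changed_format_array; decide

theorem format_array_tight : Claim_exact_format_array := by
  intro values p ind _ _ hD
  obtain ⟨hneg, hne⟩ := hD
  rw [a_empty_range values p ind (by omega), alt_eq_body]
  cases values with
  | nil => exact absurd rfl hne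
  | cons v vs =>
    intro h
    replace h := congrArg String.toList h
    simp only [bodyFmt, String.toList_append, PySem.Int.toList_toStr] at h
    have hnil : PySem.Int.toChars v = [] := by
      cases hx : PySem.Int.toChars v with
      | nil => rfl
      | cons c cs =>
        rw [hx] at h
        simp at h
    exact toChars_ne_nil v hnil
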